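-- pv_equiv track=rewrite | github.com/goyalk72/Credit-Suisse-GCC-2020 | Question3.py | find_min_days
-- ===== SOURCE A (Python) =====
-- def find_min_days(prices, profit):
--     # Participants code will be here
--     n = len(prices)
--     pr = {}
--
--     for i in range(n):
--         for j in range(i+1, n):
--             x = prices[j] - prices[i]
--             if x > 0:
--                 if x in pr.keys():
--                     if pr[x][1] > j or ( pr[x][1] == j and pr[x][0] < i):
--                         pr[x] = [i,j]
--                 else:
--                     pr[x] = [i,j]
--     ans = ""
--     for x in profit:
--         add = ""
--         if x in pr.keys():
--             add = str(pr[x][0]+1) + " " + str(pr[x][1]+1)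
--         else:
--             add = str(-1)
--         if ans == "":
--             ans = ans + add
--         else:
--             ans = ans + ',' + add
--
--     return ans
-- ===== SOURCE B (Python) =====
-- def find_min_days(prices, profit):
--     # One pass per query: scan sell days left-to-right, keeping the latest
--     # index of each price seen so far; the first sell day j with a recorded
--     # buy price prices[j]-x gives the minimal j with the maximal i.
--     outs = []
--     for x in profit:
--         res = "-1"
--         if x > 0:
--             last = {}
--             for j, p in enumerate(prices):
--                 i = last.get(p - x)
--                 if i is not None:
--                     res = str(i + 1) + " " + str(j + 1)
--                     break
--                 last[p] = j
--         outs.append(res)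
--     return ",".join(outs)
-- ===== Notes on version B (the rewrite author's own statement) =====
-- stated objective: faster
-- what changed: A precomputes an O(n^2) dictionary of every positive pairwise price difference with a replacement rule; B answers each query independently with a single left-to-right scan that keeps the latest index of each price seen so far and stops at the first sell day whose matching buy price was already seen.
import Mathlib
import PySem

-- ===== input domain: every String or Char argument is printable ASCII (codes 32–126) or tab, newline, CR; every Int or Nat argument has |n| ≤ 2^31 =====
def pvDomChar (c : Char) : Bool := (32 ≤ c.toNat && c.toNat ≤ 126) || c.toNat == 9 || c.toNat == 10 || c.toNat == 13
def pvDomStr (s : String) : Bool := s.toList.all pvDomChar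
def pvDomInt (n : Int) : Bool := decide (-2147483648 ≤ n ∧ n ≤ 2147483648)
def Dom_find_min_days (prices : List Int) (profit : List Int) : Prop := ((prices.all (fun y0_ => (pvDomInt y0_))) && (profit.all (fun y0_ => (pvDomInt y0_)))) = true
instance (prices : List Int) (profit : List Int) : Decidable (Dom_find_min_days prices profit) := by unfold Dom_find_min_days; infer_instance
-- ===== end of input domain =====

-- B replaces A's quadratic all-pairs dictionary with one left-to-right scan per query
-- that keeps the latest index of each price seen so far (objective: faster per-query work
-- when the price list is long relative to the number of queries).

-- ===== PORT A =====
def find_min_days (prices : List Int) (profit : List Int) : String :=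
  let n : Int := prices.length
  let pr : PySem.Dict Int (Int × Int) :=
    (PySem.List.pyRange 0 n 1).foldl (init := PySem.Dict.empty) fun pr i =>
      (PySem.List.pyRange (i+1) n 1).foldl (init := pr) fun pr j =>
        let x := PySem.List.pyGetD prices j 0 - PySem.List.pyGetD prices i 0
        if 0 < x then
          match pr.get? x with
          | some p => if p.2 > j ∨ (p.2 = j ∧ p.1 < i) then pr.insert x (i, j) else pr
          | none => pr.insert x (i, j)
        else pr
  profit.foldl (init := "") fun ans x =>
    let add : String :=
      match pr.get? x with
      | some p => PySem.Int.toStr (p.1 + 1) ++ " " ++ PySem.Int.toStr (p.2 + 1)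
      | none => PySem.Int.toStr (-1)
    if ans = "" then ans ++ add else ans ++ "," ++ add

-- ===== PORT B =====
-- the inner 'for j, p in enumerate(prices): … break' loop of Source B
def findPairB (x : Int) : List Int → PySem.Dict Int Int → Int → Option (Int × Int)
  | [], _, _ => none
  | p :: rest, last, j =>
    match last.get? (p - x) with
    | some i => some (i, j)
    | none => findPairB x rest (last.insert p j) (j + 1)

def find_min_days_alt (prices : List Int) (profit : List Int) : String :=
  PySem.Str.join "," (profit.map fun x =>
    if 0 < x then
      match findPairB x prices PySem.Dict.empty 0 with
      | some p => PySem.Int.toStr (p.1 + 1) ++ " " ++ PySem.Int.toStr (p.2 + 1)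
      | none => "-1"
    else "-1")

-- ===== PRECONDITION & SPEC =====
def Spec_find_min_days (prices : List Int) (profit : List Int) (out : String) : Prop := out = find_min_days_alt prices profit
instance (prices : List Int) (profit : List Int) (out : String) : Decidable (Spec_find_min_days prices profit out) := by unfold Spec_find_min_days; infer_instance

-- ===== CLAIM (what is proved, stated in full; the proofs are below) =====
def Claim_equal_find_min_days : Prop := ∀ (prices : List Int) (profit : List Int), Dom_find_min_days prices profit → Spec_find_min_days prices profit (find_min_days prices profit)

-- ===== LEMMAS AND PROOFS =====

-- pairs (i, j) with 0 ≤ i < j < n, in A's iteration order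
def pvPairs (n : Int) : List (Int × Int) :=
  (PySem.List.pyRange 0 n 1).flatMap fun i => (PySem.List.pyRange (i+1) n 1).map fun j => (i, j)

def pvDiff (prices : List Int) (p : Int × Int) : Int :=
  PySem.List.pyGetD prices p.2 0 - PySem.List.pyGetD prices p.1 0

-- the pairs A stores under key x
def pvCands (prices : List Int) (x : Int) : List (Int × Int) :=
  (pvPairs prices.length).filter fun p => decide (0 < pvDiff prices p ∧ pvDiff prices p = x)

-- A's replacement rule: keep the better of old entry q and new pair p
def pvBetter (q p : Int × Int) : Int × Int :=
  if q.2 > p.2 ∨ (q.2 = p.2 ∧ q.1 < p.1) then p else q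

def pvOmin (o : Option (Int × Int)) (p : Int × Int) : Option (Int × Int) :=
  some (match o with | none => p | some q => pvBetter q p)

-- "p is at least as good as q": smaller sell day, tie broken by larger buy day
def pvLe (p q : Int × Int) : Prop := p.2 < q.2 ∨ (p.2 = q.2 ∧ q.1 ≤ p.1)

-- (a, b) is a valid (buy, sell) pair with profit x
def pvIsPair (full : List Int) (x : Int) (p : Int × Int) : Prop :=
  ∃ (a b : Nat), p = ((a : Int), (b : Int)) ∧ a < b ∧ b < full.length ∧ full[b]! - full[a]! = x

-- B's running dict: price ↦ latest index
def pvDictOf : List Int → Int → PySem.Dict Int Int → PySem.Dict Int Int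
  | [], _, d => d
  | p :: rest, j, d => pvDictOf rest (j + 1) (d.insert p j)

-- A's rendering of one query against the built dict
def pvRenderA (pr : PySem.Dict Int (Int × Int)) (x : Int) : String :=
  match pr.get? x with
  | some p => PySem.Int.toStr (p.1 + 1) ++ " " ++ PySem.Int.toStr (p.2 + 1)
  | none => PySem.Int.toStr (-1)

-- B's rendering of one query
def pvRenderB (prices : List Int) (x : Int) : String :=
  if 0 < x then
    match findPairB x prices PySem.Dict.empty 0 with
    | some p => PySem.Int.toStr (p.1 + 1) ++ " " ++ PySem.Int.toStr (p.2 + 1)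
    | none => "-1"
  else "-1"

-- A's dictionary-building step, over flattened pairs
def pvStepA (prices : List Int) (d : PySem.Dict Int (Int × Int)) (p : Int × Int) : PySem.Dict Int (Int × Int) :=
  let x := pvDiff prices p
  if 0 < x then
    match d.get? x with
    | some q => if q.2 > p.2 ∨ (q.2 = p.2 ∧ q.1 < p.1) then d.insert x p else d
    | none => d.insert x p
  else d

lemma pvFoldl_flatMap {α β γ : Type} (g : α → List β) (f : γ → β → γ) :
    ∀ (l : List α) (init : γ), (l.flatMap g).foldl f init = l.foldl (fun acc a => (g a).foldl f acc) init := by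
  intro l
  induction l with
  | nil => intro init; rfl
  | cons a t ih => intro init; simp [List.flatMap_cons, List.foldl_append, ih]

-- A's nested loops are the flat fold over pvPairs
lemma pvBuildA_eq (prices : List Int) :
    ((PySem.List.pyRange 0 (prices.length : Int) 1).foldl (init := PySem.Dict.empty) fun pr i =>
      (PySem.List.pyRange (i+1) (prices.length : Int) 1).foldl (init := pr) fun pr j =>
        let x := PySem.List.pyGetD prices j 0 - PySem.List.pyGetD prices i 0
        if 0 < x then
          match pr.get? x with
          | some p => if p.2 > j ∨ (p.2 = j ∧ p.1 < i) then pr.insert x (i, j) else pr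
          | none => pr.insert x (i, j)
        else pr)
    = (pvPairs (prices.length : Int)).foldl (pvStepA prices) PySem.Dict.empty := by
  rw [pvPairs, pvFoldl_flatMap]
  apply PySem.List.foldl_congr_mem
  intro acc i _
  rw [List.foldl_map]
  rfl

-- entry at key x after folding a pair list = pvOmin-fold over the pairs whose key is x
lemma pvFoldStep_get? (prices : List Int) (x : Int) :
    ∀ (L : List (Int × Int)) (d : PySem.Dict Int (Int × Int)),
      ((L.foldl (pvStepA prices) d).get? x)
        = (L.filter fun p => decide (0 < pvDiff prices p ∧ pvDiff prices p = x)).foldl pvOmin (d.get? x) := by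
  intro L
  induction L with
  | nil => intro d; rfl
  | cons p t ih =>
    intro d
    rw [List.foldl_cons, ih, List.filter_cons]
    by_cases h0 : 0 < pvDiff prices p
    · by_cases hx : pvDiff prices p = x
      · have hstep : (pvStepA prices d p).get? x = pvOmin (d.get? x) p := by
          unfold pvStepA
          rw [← hx]
          simp only [if_pos h0]
          cases hd : d.get? (pvDiff prices p) with
          | none => simp [pvOmin, PySem.Dict.get?_insert_self]
          | some q =>
            simp only [pvOmin, pvBetter]
            split_ifs with hc
            · simp [PySem.Dict.get?_insert_self]
            · simp [hd]
        rw [hstep]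
        have hx0 : 0 < x := hx ▸ h0
        simp [hx, hx0]
      · have hstep : (pvStepA prices d p).get? x = d.get? x := by
          unfold pvStepA
          simp only [if_pos h0]
          cases hd : d.get? (pvDiff prices p) with
          | none => simp [PySem.Dict.get?_insert_of_ne _ _ (Ne.symm hx)]
          | some q =>
            dsimp only
            split_ifs with hc
            · simp [PySem.Dict.get?_insert_of_ne _ _ (Ne.symm hx)]
            · rfl
        rw [hstep]
        simp [hx]
    · have hstep : pvStepA prices d p = d := by
        unfold pvStepA
        simp [h0]
      rw [hstep]
      simp [h0]

lemma pvLe_refl (p : Int × Int) : pvLe p p := Or.inr ⟨rfl, le_refl _⟩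

lemma pvLe_trans {p q r : Int × Int} (h1 : pvLe p q) (h2 : pvLe q r) : pvLe p r := by
  unfold pvLe at *; omega

lemma pvBetter_le_left (q p : Int × Int) : pvLe (pvBetter q p) q := by
  unfold pvBetter pvLe; split_ifs with h <;> omega

lemma pvBetter_le_right (q p : Int × Int) : pvLe (pvBetter q p) p := by
  unfold pvBetter pvLe; split_ifs with h <;> omega

lemma pvBetter_eq (q p : Int × Int) : pvBetter q p = q ∨ pvBetter q p = p := by
  unfold pvBetter; split_ifs <;> simp

lemma pvOmin_some (L : List (Int × Int)) (q : Int × Int) :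
    ∃ p, L.foldl pvOmin (some q) = some p := by
  induction L generalizing q with
  | nil => exact ⟨q, rfl⟩
  | cons r t ih => exact ih (pvBetter q r)

lemma pvOmin_min :
    ∀ (L : List (Int × Int)) (q p : Int × Int), L.foldl pvOmin (some q) = some p →
      (p = q ∨ p ∈ L) ∧ pvLe p q ∧ ∀ r ∈ L, pvLe p r := by
  intro L
  induction L with
  | nil =>
    intro q p h
    simp only [List.foldl_nil, Option.some.injEq] at h
    subst h
    exact ⟨Or.inl rfl, pvLe_refl _, by simp⟩
  | cons r t ih =>
    intro q p h
    simp only [List.foldl_cons] at h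
    obtain ⟨hmem, hle, hall⟩ := ih (pvBetter q r) p h
    have hbq := pvBetter_le_left q r
    have hbr := pvBetter_le_right q r
    refine ⟨?_, pvLe_trans hle hbq, ?_⟩
    · rcases hmem with rfl | hm
      · rcases pvBetter_eq q r with hb | hb
        · exact Or.inl hb
        · exact Or.inr (by rw [hb]; exact List.mem_cons_self ..)
      · exact Or.inr (List.mem_cons_of_mem _ hm)
    · intro s hs
      rcases List.mem_cons.mp hs with rfl | hm
      · exact pvLe_trans hle hbr
      · exact hall s hm

lemma pvLe_antisymm {p q : Int × Int} (h1 : pvLe p q) (h2 : pvLe q p) : p = q := by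
  obtain ⟨a, b⟩ := p; obtain ⟨c, d⟩ := q
  rcases h1 with h | ⟨h, h'⟩ <;> rcases h2 with g | ⟨g, g'⟩ <;> simp_all <;> omega

lemma pvGet_append_left (l l' : List Int) (i : Nat) (h : i < l.length) : (l ++ l')[i]! = l[i]! := by
  have h2 : i < (l ++ l').length := by simp; omega
  rw [getElem!_pos l i h, getElem!_pos (l ++ l') i h2, List.getElem_append_left h]

lemma pvGet_append_len (l l' : List Int) (c : Int) : (l ++ c :: l')[l.length]! = c := by
  simp

lemma pvMem_cands (prices : List Int) (x : Int) (p : Int × Int) :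
    p ∈ pvCands prices x ↔ 0 < x ∧ pvIsPair prices x p := by
  unfold pvCands pvPairs pvIsPair
  simp only [List.mem_filter, List.mem_flatMap, List.mem_map, PySem.List.mem_pyRange_one,
    decide_eq_true_eq]
  constructor
  · rintro ⟨⟨i, ⟨hi0, hin⟩, j, ⟨hji, hjn⟩, rfl⟩, hd, hdx⟩
    unfold pvDiff at hd hdx
    simp only at hd hdx
    have hj0 : (0:Int) ≤ j := by omega
    rw [PySem.List.pyGetD_eq_getElem prices 0 hj0 (by omega),
        PySem.List.pyGetD_eq_getElem prices 0 hi0 (by omega)] at hd hdx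
    refine ⟨by omega, i.toNat, j.toNat, ?_, by omega, by omega, ?_⟩
    · simp [Int.toNat_of_nonneg hi0, Int.toNat_of_nonneg hj0]
    · rw [getElem!_pos prices j.toNat (by omega), getElem!_pos prices i.toNat (by omega)]
      exact hdx
  · rintro ⟨hx0, a, b, rfl, hab, hb, heq⟩
    rw [getElem!_pos prices a (by omega), getElem!_pos prices b hb] at heq
    have hdz : pvDiff prices ((a:Int), (b:Int)) = x := by
      unfold pvDiff
      simp only
      rw [PySem.List.pyGetD_eq_getElem prices 0 (by omega) (by omega),
          PySem.List.pyGetD_eq_getElem prices 0 (by omega) (by omega)]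
      simpa using heq
    refine ⟨⟨(a:Int), ⟨by omega, by omega⟩, (b:Int), ⟨by omega, by omega⟩, rfl⟩, by rw [hdz]; exact hx0, hdz⟩

lemma pvDictOf_append (p : Int) :
    ∀ (h : List Int) (j : Int) (d : PySem.Dict Int Int),
      pvDictOf (h ++ [p]) j d = (pvDictOf h j d).insert p (j + h.length) := by
  intro h
  induction h with
  | nil => intro j d; simp [pvDictOf]
  | cons q t ih =>
    intro j d
    simp only [List.cons_append, pvDictOf, ih]
    congr 1
    simp only [List.length_cons]
    push_cast
    ring

lemma pvDictOf_get?_none {h : List Int} {v : Int} :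
    (pvDictOf h 0 PySem.Dict.empty).get? v = none → v ∉ h := by
  induction h using List.reverseRecOn with
  | nil => simp
  | append_singleton t p ih =>
    intro hn
    rw [pvDictOf_append, PySem.Dict.get?_insert] at hn
    split_ifs at hn with hv
    simp only [List.mem_append, List.mem_singleton]
    rintro (ht | rfl)
    · exact ih hn ht
    · exact hv rfl

lemma pvDictOf_get?_some {h : List Int} {v i : Int} :
    (pvDictOf h 0 PySem.Dict.empty).get? v = some i →
    ∃ k : Nat, i = (k : Int) ∧ k < h.length ∧ h[k]! = v ∧ ∀ m : Nat, k < m → m < h.length → h[m]! ≠ v := by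
  induction h using List.reverseRecOn generalizing i with
  | nil => simp [pvDictOf]
  | append_singleton t p ih =>
    intro hs
    rw [pvDictOf_append, PySem.Dict.get?_insert] at hs
    split_ifs at hs with hv
    · subst hv
      injection hs with hs
      refine ⟨t.length, by omega, by simp, ?_, ?_⟩
      · exact pvGet_append_len t [] v
      · intro m hm1 hm2
        simp at hm2
        omega
    · obtain ⟨k, rfl, hk, hkv, hkmax⟩ := ih hs
      refine ⟨k, rfl, by simp; omega, ?_, ?_⟩
      · rw [pvGet_append_left _ _ _ hk]; exact hkv
      · intro m hm1 hm2
        simp only [List.length_append, List.length_singleton] at hm2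
        by_cases hmt : m < t.length
        · rw [pvGet_append_left _ _ _ hmt]
          exact hkmax m hm1 hmt
        · have : m = t.length := by omega
          subst this
          rw [pvGet_append_len t [] p]
          exact fun hc => hv hc.symm

-- core correctness of B's scan
lemma pvFindPairB_go (x : Int) :
    ∀ (l h : List Int),
      (∀ a b : Nat, a < b → b < h.length → h[b]! - h[a]! ≠ x) →
      (findPairB x l (pvDictOf h 0 PySem.Dict.empty) (h.length : Int) = none →
          ∀ p, ¬ pvIsPair (h ++ l) x p)
      ∧ (∀ p, findPairB x l (pvDictOf h 0 PySem.Dict.empty) (h.length : Int) = some p →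
          pvIsPair (h ++ l) x p ∧ ∀ q, pvIsPair (h ++ l) x q → pvLe p q) := by
  intro l
  induction l with
  | nil =>
    intro h hin
    refine ⟨?_, ?_⟩
    · intro _ p hp
      obtain ⟨a, b, rfl, hab, hb, heq⟩ := hp
      simp only [List.append_nil] at hb heq
      exact hin a b hab hb heq
    · intro p hp
      simp [findPairB] at hp
  | cons c rest ih =>
    intro h hin
    cases hd : (pvDictOf h 0 PySem.Dict.empty).get? (c - x) with
    | some i =>
      have hres : findPairB x (c :: rest) (pvDictOf h 0 PySem.Dict.empty) (h.length : Int)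
          = some (i, (h.length : Int)) := by
        simp [findPairB, hd]
      obtain ⟨k, rfl, hk, hkv, hkmax⟩ := pvDictOf_get?_some hd
      have hfullc : (h ++ c :: rest)[h.length]! = c := pvGet_append_len h rest c
      have hfullk : (h ++ c :: rest)[k]! = h[k]! := pvGet_append_left h _ k hk
      have hpair : pvIsPair (h ++ c :: rest) x ((k : Int), (h.length : Int)) :=
        ⟨k, h.length, rfl, hk, by simp, by rw [hfullc, hfullk, hkv]; ring⟩
      have hmin : ∀ q, pvIsPair (h ++ c :: rest) x q → pvLe ((k : Int), (h.length : Int)) q := by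
        rintro q ⟨a, b, rfl, hab, hb, heq⟩
        rcases lt_trichotomy b h.length with hbl | hbl | hbl
        · exfalso
          rw [pvGet_append_left h _ b hbl, pvGet_append_left h _ a (by omega)] at heq
          exact hin a b hab hbl heq
        · subst hbl
          rw [hfullc, pvGet_append_left h _ a hab] at heq
          have hav : h[a]! = c - x := by omega
          have hak : a ≤ k := by
            by_contra hcon
            exact hkmax a (by omega) hab (hkv ▸ hav)
          exact Or.inr ⟨rfl, by show (a:Int) ≤ (k:Int); exact_mod_cast hak⟩
        · exact Or.inl (by show ((h.length:Int)) < (b:Int); exact_mod_cast hbl)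
      refine ⟨?_, ?_⟩
      · intro hnone
        rw [hres] at hnone
        cases hnone
      · intro p hp
        rw [hres] at hp
        injection hp with hp
        subst hp
        exact ⟨hpair, hmin⟩
    | none =>
      have hinv : ∀ a b : Nat, a < b → b < (h ++ [c]).length → (h ++ [c])[b]! - (h ++ [c])[a]! ≠ x := by
        intro a b hab hb
        simp only [List.length_append, List.length_singleton] at hb
        by_cases hbt : b < h.length
        · rw [pvGet_append_left h _ b hbt, pvGet_append_left h _ a (by omega)]
          exact hin a b hab hbt
        · have hbe : b = h.length := by omega
          subst hbe
          rw [pvGet_append_len h [] c, pvGet_append_left h _ a (by omega)]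
          intro hcon
          have hav : h[a]! = c - x := by omega
          have hmem : c - x ∈ h := by
            rw [getElem!_pos h a (by omega)] at hav
            exact hav ▸ List.getElem_mem _
          exact pvDictOf_get?_none hd hmem
      have hstep : findPairB x (c :: rest) (pvDictOf h 0 PySem.Dict.empty) (h.length : Int)
          = findPairB x rest (pvDictOf (h ++ [c]) 0 PySem.Dict.empty) ((h ++ [c]).length : Int) := by
        rw [pvDictOf_append]
        simp [findPairB, hd]
      have hrec := ih (h ++ [c]) hinv
      rw [List.append_assoc, List.singleton_append] at hrec
      rw [hstep]
      exact hrec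

-- per-query agreement
lemma pvRender_eq (prices : List Int) (x : Int) :
    pvRenderA ((pvPairs (prices.length : Int)).foldl (pvStepA prices) PySem.Dict.empty) x
      = pvRenderB prices x := by
  unfold pvRenderA pvRenderB
  rw [pvFoldStep_get? prices x (pvPairs (prices.length : Int)) PySem.Dict.empty,
      PySem.Dict.get?_empty]
  by_cases hx : 0 < x
  · have hmain := pvFindPairB_go x prices [] (by intro a b _ hb; simp at hb)
    simp only [pvDictOf, List.nil_append, List.length_nil, Nat.cast_zero] at hmain
    obtain ⟨hnone, hsome⟩ := hmain
    cases hF : findPairB x prices PySem.Dict.empty 0 with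
    | none =>
      have hc : pvCands prices x = [] := by
        rw [List.eq_nil_iff_forall_not_mem]
        intro p hp
        exact hnone hF p ((pvMem_cands prices x p).mp hp).2
      rw [show ((pvPairs (prices.length : Int)).filter
            fun p => decide (0 < pvDiff prices p ∧ pvDiff prices p = x)) = pvCands prices x from rfl, hc]
      simp [hx]
      decide
    | some p =>
      obtain ⟨hp, hmin⟩ := hsome p hF
      have hpc : p ∈ pvCands prices x := (pvMem_cands prices x p).mpr ⟨hx, hp⟩
      rw [show ((pvPairs (prices.length : Int)).filter
            fun p => decide (0 < pvDiff prices p ∧ pvDiff prices p = x)) = pvCands prices x from rfl]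
      cases hcl : pvCands prices x with
      | nil => rw [hcl] at hpc; cases hpc
      | cons r t =>
        obtain ⟨q, hq⟩ := pvOmin_some t r
        have hfold : (r :: t).foldl pvOmin none = some q := by
          rw [List.foldl_cons]
          exact hq
        obtain ⟨hqmem, hqr, hqt⟩ := pvOmin_min t r q hq
        have hqc : q ∈ pvCands prices x := by
          rw [hcl]
          rcases hqmem with rfl | hm
          · exact List.mem_cons_self ..
          · exact List.mem_cons_of_mem _ hm
        have h1 : pvLe p q := hmin q ((pvMem_cands prices x q).mp hqc).2
        have h2 : pvLe q p := by
          rw [hcl] at hpc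
          rcases List.mem_cons.mp hpc with rfl | hm
          · exact hqr
          · exact hqt _ hm
        have hpq : p = q := pvLe_antisymm h1 h2
        rw [hfold, ← hpq]
        simp [hx]
  · have hc : ∀ p ∈ pvPairs (prices.length : Int),
        ¬ (decide (0 < pvDiff prices p ∧ pvDiff prices p = x)) = true := by
      intro p _
      simp only [decide_eq_true_eq]
      rintro ⟨h1, h2⟩
      omega
    rw [List.filter_eq_nil_iff.mpr hc]
    simp [hx]
    decide

lemma pvAppend_ne_left (a b : String) (h : a ≠ "") : a ++ b ≠ "" := by
  intro hc
  apply h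
  have h2 : a.toList ++ b.toList = [] := by
    rw [← String.toList_append, hc]
    rfl
  have h3 : a.toList = [] := (List.append_eq_nil_iff.mp h2).1
  rwa [String.toList_eq_nil_iff] at h3

lemma pvAppend_ne_right (a b : String) (h : b ≠ "") : a ++ b ≠ "" := by
  intro hc
  apply h
  have h2 : a.toList ++ b.toList = [] := by
    rw [← String.toList_append, hc]
    rfl
  have h3 : b.toList = [] := (List.append_eq_nil_iff.mp h2).2
  rwa [String.toList_eq_nil_iff] at h3

lemma pvJoin_fold_aux : ∀ (t : List String) (acc : String), acc ≠ "" → (∀ s ∈ t, s ≠ "") →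
    t.foldl (fun ans add => if ans = "" then ans ++ add else ans ++ "," ++ add) acc
      = PySem.Str.join "," (acc :: t) := by
  intro t
  induction t with
  | nil =>
    intro acc _ _
    apply String.ext
    rw [PySem.Str.toList_join]
    simp [PySem.Chars.join_singleton]
  | cons s t' ih =>
    intro acc hacc hne
    rw [List.foldl_cons, if_neg hacc]
    have hcomma : (acc ++ "," : String) ≠ "" := pvAppend_ne_left _ _ hacc
    rw [ih (acc ++ "," ++ s) (pvAppend_ne_left _ _ hcomma) (fun u hu => hne u (List.mem_cons_of_mem _ hu))]
    -- join "," ((acc ++ "," ++ s) :: t') = join "," (acc :: s :: t')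
    apply String.ext
    rw [PySem.Str.toList_join, PySem.Str.toList_join]
    cases t' with
    | nil =>
      simp only [List.map_cons, List.map_nil, PySem.Chars.join_cons_cons,
        PySem.Chars.join_singleton, String.toList_append]
    | cons u t'' =>
      simp only [List.map_cons, PySem.Chars.join_cons_cons, String.toList_append]
      simp

lemma pvJoin_fold (L : List String) (hne : ∀ s ∈ L, s ≠ "") :
    L.foldl (fun ans add => if ans = "" then ans ++ add else ans ++ "," ++ add) ""
      = PySem.Str.join "," L := by
  cases L with
  | nil => rfl
  | cons s t =>
    rw [List.foldl_cons, if_pos rfl]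
    have hs : ("" : String) ++ s = s := by
      exact String.ext (by simp)
    rw [hs]
    have hsne : s ≠ "" := hne s (List.mem_cons_self ..)
    exact pvJoin_fold_aux t s hsne (fun u hu => hne u (List.mem_cons_of_mem _ hu))

lemma pvRenderB_ne (prices : List Int) (x : Int) : pvRenderB prices x ≠ "" := by
  unfold pvRenderB
  split_ifs with hx
  · cases findPairB x prices PySem.Dict.empty 0 with
    | none => decide
    | some p =>
      simp only
      apply pvAppend_ne_left
      apply pvAppend_ne_right
      decide
  · decide

-- ===== VERDICT (by name: the statement is the Claim_ definition above) =====
theorem find_min_days_spec : Claim_equal_find_min_days := by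
  intro prices profit _
  show find_min_days prices profit = find_min_days_alt prices profit
  have hA : find_min_days prices profit
      = profit.foldl (fun ans x =>
          let add := pvRenderA ((pvPairs (prices.length : Int)).foldl (pvStepA prices) PySem.Dict.empty) x
          if ans = "" then ans ++ add else ans ++ "," ++ add) "" := by
    rw [← pvBuildA_eq prices]
    rfl
  have hB : find_min_days_alt prices profit
      = PySem.Str.join "," (profit.map (pvRenderB prices)) := rfl
  rw [hA, hB]
  have hfun : (fun (ans : String) (x : Int) =>
        let add := pvRenderA ((pvPairs (prices.length : Int)).foldl (pvStepA prices) PySem.Dict.empty) x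
        if ans = "" then ans ++ add else ans ++ "," ++ add)
      = (fun (ans : String) (x : Int) =>
        if ans = "" then ans ++ pvRenderB prices x else ans ++ "," ++ pvRenderB prices x) := by
    funext ans x
    simp only [pvRender_eq prices x]
  rw [hfun]
  have hjoin := pvJoin_fold (profit.map (pvRenderB prices)) (fun s hs => by
    obtain ⟨y, _, rfl⟩ := List.mem_map.mp hs
    exact pvRenderB_ne prices y)
  rw [List.foldl_map] at hjoin
  exact hjoin
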